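-- pv_equiv track=rewrite | github.com/PyGithub/PyGithub | scripts/fix_headers.py | extractBodyLines
-- ===== SOURCE A (Python) =====
-- eightySharps = "#" * 80
--
-- def extractBodyLines(lines):
--     bodyLines = []
--
--     seenEndOfHeader = False
--
--     for line in lines:
--         if len(line) > 0 and line[0] != "#":
--             seenEndOfHeader = True
--         if seenEndOfHeader:
--             bodyLines.append(line)
--         # else:
--         #     print "HEAD:", line
--         if line == eightySharps:
--             seenEndOfHeader = True
--
--     # print "BODY:", "\nBODY: ".join(bodyLines)
--
--     return bodyLines
-- ===== SOURCE B (Python) =====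
-- eightySharps = "#" * 80
--
-- def extractBodyLines(lines):
--     for i, line in enumerate(lines):
--         if line and line[0] != "#":
--             return list(lines[i:])
--         if line == eightySharps:
--             return list(lines[i + 1:])
--     return []
-- ===== Notes on version B (the rewrite author's own statement) =====
-- stated objective: simpler
-- what changed: B locates the body-start boundary with an early-exit index scan and returns a slice of the tail, instead of threading a seenEndOfHeader flag through the whole list and appending line by line.
import Mathlib
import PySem

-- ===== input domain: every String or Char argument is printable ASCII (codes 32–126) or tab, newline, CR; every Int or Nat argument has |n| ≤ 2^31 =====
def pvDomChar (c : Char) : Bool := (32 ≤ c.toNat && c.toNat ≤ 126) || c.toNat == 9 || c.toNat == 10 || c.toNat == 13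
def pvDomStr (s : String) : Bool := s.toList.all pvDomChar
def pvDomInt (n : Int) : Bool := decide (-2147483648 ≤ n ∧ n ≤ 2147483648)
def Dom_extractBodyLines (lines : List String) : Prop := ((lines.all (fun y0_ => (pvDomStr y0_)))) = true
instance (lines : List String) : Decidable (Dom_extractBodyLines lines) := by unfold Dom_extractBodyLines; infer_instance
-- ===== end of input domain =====

-- B replaces A's seenEndOfHeader flag + line-by-line append with an early-exit
-- scan for the body-start boundary followed by a tail slice (objective: simpler).

-- ===== PORT A =====
def eightySharps : String := String.mk (List.replicate 80 '#')

def extractBodyLines (lines : List String) : List String :=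
  (lines.foldl
    (fun (st : List String × Bool) line =>
      let seen := if 0 < PySem.Str.len line ∧ PySem.Str.pyGet? line 0 ≠ some '#' then true else st.2
      let body := if seen then st.1 ++ [line] else st.1
      let seen' := if line = eightySharps then true else seen
      (body, seen'))
    ([], false)).1

-- ===== PORT B =====
def bodyFrom : List String → List String
  | [] => []
  | line :: rest =>
    if line ≠ "" ∧ PySem.Str.pyGet? line 0 ≠ some '#' then line :: rest
    else if line = eightySharps then rest
    else bodyFrom rest

def extractBodyLines_alt (lines : List String) : List String :=
  bodyFrom lines

-- ===== PRECONDITION & SPEC =====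
def Spec_extractBodyLines (lines : List String) (out : List String) : Prop := out = extractBodyLines_alt lines
instance (lines : List String) (out : List String) : Decidable (Spec_extractBodyLines lines out) := by unfold Spec_extractBodyLines; infer_instance

-- ===== CLAIM (what is proved, stated in full; the proofs are below) =====
def Claim_equal_extractBodyLines : Prop := ∀ (lines : List String), Dom_extractBodyLines lines → Spec_extractBodyLines lines (extractBodyLines lines)

-- ===== LEMMAS AND PROOFS =====

-- abbreviation for A's loop body (proof-side only)
def stepA (st : List String × Bool) (line : String) : List String × Bool :=
  let seen := if 0 < PySem.Str.len line ∧ PySem.Str.pyGet? line 0 ≠ some '#' then true else st.2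
  let body := if seen then st.1 ++ [line] else st.1
  let seen' := if line = eightySharps then true else seen
  (body, seen')

theorem foldA_seen (lines : List String) (acc : List String) :
    lines.foldl stepA (acc, true) = (acc ++ lines, true) := by
  induction lines generalizing acc with
  | nil => simp
  | cons l rest ih =>
    simp only [List.foldl_cons, stepA]
    split_ifs <;> simp_all [ih]

theorem len_pos_iff (s : String) : 0 < PySem.Str.len s ↔ s ≠ "" := by
  simp only [PySem.Str.len_eq]
  constructor
  · intro h he; subst he; simp at h
  · intro h
    have hne : s.toList ≠ [] := by
      intro he
      apply h
      have := congrArg String.mk he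
      simpa [String.mk] using this
    have := List.length_pos_iff.mpr hne
    exact_mod_cast this

theorem foldA_unseen (lines : List String) (acc : List String) :
    (lines.foldl stepA (acc, false)).1 = acc ++ bodyFrom lines := by
  induction lines generalizing acc with
  | nil => simp [bodyFrom]
  | cons l rest ih =>
    by_cases hc : l ≠ "" ∧ PySem.Str.pyGet? l 0 ≠ some '#'
    · have hc' : 0 < PySem.Str.len l ∧ PySem.Str.pyGet? l 0 ≠ some '#' :=
        ⟨(len_pos_iff l).mpr hc.1, hc.2⟩
      simp only [List.foldl_cons, stepA, if_pos hc', if_pos]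
      rw [show (if l = eightySharps then true else true) = true by simp]
      rw [foldA_seen, bodyFrom, if_pos hc]
      simp
    · have hc' : ¬ (0 < PySem.Str.len l ∧ PySem.Str.pyGet? l 0 ≠ some '#') := by
        intro ⟨h1, h2⟩; exact hc ⟨(len_pos_iff l).mp h1, h2⟩
      by_cases h80 : l = eightySharps
      · simp only [List.foldl_cons, stepA, if_neg hc', if_pos h80]
        simp only [if_neg (by simp : ¬ (false = true))]
        rw [foldA_seen, bodyFrom, if_neg hc, if_pos h80]
      · simp only [List.foldl_cons, stepA, if_neg hc', if_neg h80]
        simp only [if_neg (by simp : ¬ (false = true))]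
        rw [ih, bodyFrom, if_neg hc, if_neg h80]

-- ===== VERDICT (by name: the statement is the Claim_ definition above) =====
theorem extractBodyLines_spec : Claim_equal_extractBodyLines := by
  intro lines _
  show extractBodyLines lines = extractBodyLines_alt lines
  have : extractBodyLines lines = (lines.foldl stepA ([], false)).1 := rfl
  rw [this, foldA_unseen]
  simp [extractBodyLines_alt]
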